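-- pv_equiv track=rewrite | github.com/vikassingh2101/cryptography | 7HillCipher.py | convert_string_to_matrix
-- ===== SOURCE A (Python) =====
-- import math
--
-- def convert_string_to_matrix(text):
--     size = math.ceil(math.sqrt(len(text)))
--     text = text.upper()
--     matrix = []
--     for i in range(size):
--         matrix.append([ord(char)-65 for char in text[i*size: (i+1)*size]])
--     for i in range(size - len(matrix[-1])):
--         matrix[-1].append(ord('X')-65)
--
--     return matrix
-- ===== SOURCE B (Python) =====
-- import math
--
-- def convert_string_to_matrix(text):
--     size = math.ceil(math.sqrt(len(text)))
--     matrix = []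
--     row = []
--     for ch in text.upper():
--         row.append(ord(ch) - 65)
--         if len(row) == size:
--             matrix.append(row)
--             row = []
--     while len(matrix) < size:
--         matrix.append(row)
--         row = []
--     if matrix:
--         last = matrix[-1]
--         while len(last) < size:
--             last.append(ord('X') - 65)
--     return matrix
-- ===== Notes on version B (the rewrite author's own statement) =====
-- stated objective: alternative
-- what changed: B makes a single pass over the text with a running-row accumulator that is flushed every size characters (then fills to size rows and pads the last row with while-loops), instead of A's per-row loop that slices text[i*size:(i+1)*size] once per row.
import Mathlib
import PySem

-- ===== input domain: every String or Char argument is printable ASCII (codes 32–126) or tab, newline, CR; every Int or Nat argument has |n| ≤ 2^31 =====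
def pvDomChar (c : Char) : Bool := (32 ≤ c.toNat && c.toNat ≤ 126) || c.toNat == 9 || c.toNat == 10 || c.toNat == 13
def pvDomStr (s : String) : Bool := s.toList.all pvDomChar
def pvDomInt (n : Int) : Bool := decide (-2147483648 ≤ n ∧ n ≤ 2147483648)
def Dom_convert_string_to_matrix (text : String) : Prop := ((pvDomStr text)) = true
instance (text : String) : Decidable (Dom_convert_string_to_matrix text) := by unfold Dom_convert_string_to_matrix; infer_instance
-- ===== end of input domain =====

-- B replaces A's per-row slicing (one slice of the text per row) by a single pass that fills rows
-- with a running accumulator (objective: alternative decomposition, same asymptotic cost).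
-- On the empty string A raises IndexError (matrix[-1] on []) while B returns []; that input is
-- excluded by Pre_.


-- ===== PORT A =====
-- math.ceil(math.sqrt(n)) for a Python int n ≥ 0: the least s with n ≤ s*s.  Exact for every
-- length below 2^52 (math.sqrt is correctly rounded, so the float ceil agrees there).
def pyCeilSqrt (n : Nat) : Nat :=
  if Nat.sqrt n * Nat.sqrt n = n then Nat.sqrt n else Nat.sqrt n + 1

def convert_string_to_matrix (text : String) : List (List Int) :=
  let size := pyCeilSqrt (PySem.Str.len text).toNat   -- len(text) ≥ 0, so .toNat is exact
  let t := (PySem.Str.upper text).toList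
  let matrix := (PySem.List.pyRange 0 (size : Int)).foldl
      (fun m i => m ++ [(PySem.List.slice t (some (i * size)) (some ((i + 1) * size))).map
                          (fun c => ((c.toNat : Int) - 65))]) []
  match matrix.getLast? with
  | none => matrix   -- Python raises IndexError here (only for text = ""); excluded by Pre_
  | some last =>
      matrix.dropLast ++
        [(PySem.List.pyRange 0 ((size : Int) - last.length)).foldl
            (fun r _ => r ++ [(('X'.toNat : Int) - 65)]) last]

-- ===== PORT B =====
-- the for-loop of Source B: push each code into the current row, flush the row when it reaches size
def bLoop (size : Nat) : List Char → List (List Int) → List Int → List (List Int) × List Int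
  | [], m, r => (m, r)
  | c :: cs, m, r =>
    let r' := r ++ [((c.toNat : Int) - 65)]
    if r'.length = size then bLoop size cs (m ++ [r']) [] else bLoop size cs m r'

-- first while-loop of Source B ('while len(matrix) < size: matrix.append(row); row = []'), expressed
-- structurally on its iteration count k - m.length (the loop body runs exactly that often)
def fillToAux : Nat → List (List Int) → List Int → List (List Int)
  | 0, m, _ => m
  | f + 1, m, r => fillToAux f (m ++ [r]) []

def fillTo (k : Nat) (m : List (List Int)) (r : List Int) : List (List Int) :=
  fillToAux (k - m.length) m r

-- second while-loop of Source B ('while len(last) < size: last.append(ord('X')-65)'), again on its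
-- iteration count size - row.length
def padAux : Nat → List Int → List Int
  | 0, row => row
  | f + 1, row => padAux f (row ++ [(('X'.toNat : Int) - 65)])

def padB (size : Nat) (row : List Int) : List Int :=
  padAux (size - row.length) row

def convert_string_to_matrix_alt (text : String) : List (List Int) :=
  let size := pyCeilSqrt (PySem.Str.len text).toNat   -- len(text) ≥ 0, so .toNat is exact
  let p := bLoop size (PySem.Str.upper text).toList [] []
  let m := fillTo size p.1 p.2
  match m.getLast? with
  | none => m                                        -- 'if matrix:' guard: nothing to pad
  | some last => m.dropLast ++ [padB size last]

-- ===== PRECONDITION & SPEC =====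
-- Pre_ excludes only the empty string, on which A raises IndexError (matrix[-1] of an empty list).
def Pre_convert_string_to_matrix (text : String) : Prop := text ≠ ""
instance (text : String) : Decidable (Pre_convert_string_to_matrix text) := by
  unfold Pre_convert_string_to_matrix; infer_instance

def pvWitness_convert_string_to_matrix : String := "Hello"

def Spec_convert_string_to_matrix (text : String) (out : List (List Int)) : Prop :=
  out = convert_string_to_matrix_alt text
instance (text : String) (out : List (List Int)) : Decidable (Spec_convert_string_to_matrix text out) := by
  unfold Spec_convert_string_to_matrix; infer_instance

-- ===== CLAIM (what is proved, stated in full; the proofs are below) =====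
def Claim_equal_convert_string_to_matrix : Prop :=
  ∀ (text : String), Dom_convert_string_to_matrix text → Pre_convert_string_to_matrix text →
    Spec_convert_string_to_matrix text (convert_string_to_matrix text)

-- ===== LEMMAS AND PROOFS =====

-- common reference shape: k rows, row i = take size of successive drops
def rowsSpec : Nat → Nat → List Int → List (List Int)
  | 0, _, _ => []
  | k + 1, size, l => l.take size :: rowsSpec k size (l.drop size)

-- reference splitter: full chunks of length size, plus the remainder (< size)
def csplit (size : Nat) (t : List Int) : List (List Int) × List Int :=
  if _h : 0 < size ∧ size ≤ t.length then
    let p := csplit size (t.drop size)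
    (t.take size :: p.1, p.2)
  else ([], t)
termination_by t.length
decreasing_by simp; omega

theorem rowsSpec_nil (k size : Nat) : rowsSpec k size [] = List.replicate k [] := by
  induction k with
  | zero => rfl
  | succ k ih => simp [rowsSpec, ih, List.replicate_succ]

theorem rowsSpec_row_len {k size : Nat} {l : List Int} {row : List Int}
    (h : row ∈ rowsSpec k size l) : row.length ≤ size := by
  induction k generalizing l with
  | zero => simp [rowsSpec] at h
  | succ k ih =>
    simp only [rowsSpec, List.mem_cons] at h
    rcases h with h | h
    · subst h; exact List.length_take_le size l
    · exact ih h

-- A's row loop equals rowsSpec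
theorem range_map_eq_rowsSpec (k size : Nat) (l : List Int) :
    (List.range k).map (fun i => (l.drop (i * size)).take size) = rowsSpec k size l := by
  induction k generalizing l with
  | zero => rfl
  | succ k ih =>
    rw [List.range_succ_eq_map]
    simp only [List.map_cons, List.map_map, rowsSpec]
    refine congrArg₂ _ (by simp) ?_
    rw [← ih (l.drop size)]
    apply List.map_congr_left
    intro i _
    simp only [Function.comp, Nat.succ_eq_add_one, List.drop_drop]
    congr 2
    rw [Nat.add_mul]
    omega

-- B's for-loop equals csplit on the mapped codes
theorem bLoop_eq_csplit (size : Nat) (hsize : 0 < size) :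
    ∀ (cs : List Char) (m : List (List Int)) (r : List Int), r.length < size →
      bLoop size cs m r =
        (m ++ (csplit size (r ++ cs.map (fun c => ((c.toNat : Int) - 65)))).1,
         (csplit size (r ++ cs.map (fun c => ((c.toNat : Int) - 65)))).2) := by
  intro cs
  induction cs with
  | nil =>
    intro m r hr
    rw [bLoop, csplit, dif_neg (by simp; omega)]
    simp
  | cons c cs ih =>
    intro m r hr
    rw [bLoop]
    by_cases hfull : (r ++ [((c.toNat : Int) - 65)]).length = size
    · rw [if_pos hfull, ih (m ++ [r ++ [((c.toNat : Int) - 65)]]) [] hsize]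
      have hsplit : r ++ (c :: cs).map (fun c => ((c.toNat : Int) - 65)) =
          (r ++ [((c.toNat : Int) - 65)]) ++ cs.map (fun c => ((c.toNat : Int) - 65)) := by
        simp
      rw [hsplit]
      rw [show csplit size ((r ++ [((c.toNat : Int) - 65)]) ++ cs.map (fun c => ((c.toNat : Int) - 65))) =
            ((r ++ [((c.toNat : Int) - 65)]) ::
              (csplit size (cs.map (fun c => ((c.toNat : Int) - 65)))).1,
             (csplit size (cs.map (fun c => ((c.toNat : Int) - 65)))).2) from ?_]
      · simp
      · rw [csplit, dif_pos ⟨hsize, by simp [← hfull]⟩]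
        rw [← hfull, List.take_left, List.drop_left]
    · rw [if_neg hfull]
      have hlt : (r ++ [((c.toNat : Int) - 65)]).length < size := by
        simp at hfull ⊢; omega
      rw [ih m (r ++ [((c.toNat : Int) - 65)]) hlt]
      simp

-- closed form of the fill loop's body
theorem fillToAux_eq (f : Nat) : ∀ (m : List (List Int)) (r : List Int),
    fillToAux f m r = if 0 < f then m ++ r :: List.replicate (f - 1) [] else m := by
  induction f with
  | zero => intro m r; simp [fillToAux]
  | succ f ih =>
    intro m r
    rw [fillToAux, ih]
    by_cases h : 0 < f
    · rw [if_pos h, if_pos (by omega)]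
      have : f + 1 - 1 = (f - 1) + 1 := by omega
      rw [this, List.replicate_succ]
      simp
    · have : f = 0 := by omega
      subst this
      simp

theorem fillTo_eq (k : Nat) (m : List (List Int)) (r : List Int) :
    fillTo k m r =
      if m.length < k then m ++ r :: List.replicate (k - m.length - 1) [] else m := by
  rw [fillTo, fillToAux_eq]
  by_cases h : m.length < k
  · rw [if_pos (by omega), if_pos h]
  · rw [if_neg (by omega), if_neg h]

theorem fillTo_cons (k : Nat) (a : List Int) (m : List (List Int)) (r : List Int) :
    fillTo (k + 1) (a :: m) r = a :: fillTo k m r := by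
  rw [fillTo_eq, fillTo_eq]
  by_cases h : m.length < k
  · rw [if_pos (by simp only [List.length_cons]; omega), if_pos h]
    have hc : k + 1 - (a :: m).length - 1 = k - m.length - 1 := by
      simp only [List.length_cons]; omega
    rw [hc]
    simp
  · rw [if_neg (by simp only [List.length_cons]; omega), if_neg h]

-- fill-after-split equals rowsSpec when everything fits in k rows
theorem fill_csplit_eq_rowsSpec (size : Nat) (hsize : 0 < size) :
    ∀ (k : Nat) (t : List Int), t.length ≤ k * size →
      fillTo k (csplit size t).1 (csplit size t).2 = rowsSpec k size t := by
  intro k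
  induction k with
  | zero =>
    intro t ht
    have htnil : t = [] := by
      cases t with
      | nil => rfl
      | cons a t => simp at ht
    subst htnil
    rw [csplit, dif_neg (by simp; omega)]
    simp [fillTo_eq, rowsSpec]
  | succ k ih =>
    intro t ht
    have ht' : t.length ≤ k * size + size := by
      rw [Nat.succ_mul] at ht; exact ht
    by_cases hfit : size ≤ t.length
    · rw [csplit, dif_pos ⟨hsize, hfit⟩]
      simp only [rowsSpec]
      rw [fillTo_cons]
      rw [ih (t.drop size) (by simp; omega)]
    · rw [csplit, dif_neg (by omega)]
      rw [fillTo_eq]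
      simp only [List.length_nil, if_pos (Nat.succ_pos k), List.nil_append]
      rw [rowsSpec, List.take_of_length_le (by omega), List.drop_eq_nil_of_le (by omega),
        rowsSpec_nil]
      simp

-- both padding loops are "append ord('X')-65 until the row has length size"
theorem padAux_eq (f : Nat) : ∀ (row : List Int),
    padAux f row = row ++ List.replicate f (('X'.toNat : Int) - 65) := by
  induction f with
  | zero => intro row; simp [padAux]
  | succ f ih =>
    intro row
    rw [padAux, ih, List.replicate_succ]
    simp

theorem padB_eq (size : Nat) (row : List Int) :
    padB size row = row ++ List.replicate (size - row.length) (('X'.toNat : Int) - 65) := by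
  rw [padB, padAux_eq]

theorem padA_eq (size : Nat) (row : List Int) (h : row.length ≤ size) :
    (PySem.List.pyRange 0 ((size : Int) - row.length)).foldl
        (fun r _ => r ++ [(('X'.toNat : Int) - 65)]) row =
      row ++ List.replicate (size - row.length) (('X'.toNat : Int) - 65) := by
  have hcast : ((size : Int) - row.length) = ((size - row.length : Nat) : Int) := by omega
  rw [hcast, PySem.List.pyRange_zero_natCast, List.foldl_map,
    PySem.List.foldl_append_singleton_eq_map]
  simp [List.map_const']

-- A's matrix (before padding) is rowsSpec size size of the code list
theorem matrixA_eq (t : List Char) (size : Nat) :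
    (PySem.List.pyRange 0 (size : Int)).foldl
        (fun m i => m ++ [(PySem.List.slice t (some (i * size)) (some ((i + 1) * size))).map
                            (fun c => ((c.toNat : Int) - 65))]) [] =
      rowsSpec size size (t.map (fun c => ((c.toNat : Int) - 65))) := by
  rw [PySem.List.pyRange_zero_natCast, List.foldl_map,
    PySem.List.foldl_append_singleton_eq_map, List.nil_append]
  rw [← range_map_eq_rowsSpec size size]
  apply List.map_congr_left
  intro i _
  have h1 : ((i : Int) * size) = ((i * size : Nat) : Int) := by push_cast; ring
  have h2 : (((i : Int) + 1) * size) = (((i + 1) * size : Nat) : Int) := by push_cast; ring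
  rw [h1, h2, PySem.List.slice_natCast]
  have h3 : (i + 1) * size - i * size = size := by
    rw [Nat.add_mul]; omega
  rw [h3, List.map_take, List.map_drop]

-- the whole B pipeline before padding equals A's matrix
theorem matrixB_eq (cs : List Char) (size : Nat) (hsize : 0 < size)
    (hlen : cs.length ≤ size * size) :
    fillTo size (bLoop size cs [] []).1 (bLoop size cs [] []).2 =
      rowsSpec size size (cs.map (fun c => ((c.toNat : Int) - 65))) := by
  rw [bLoop_eq_csplit size hsize cs [] [] hsize]
  simp only [List.nil_append]
  exact fill_csplit_eq_rowsSpec size hsize size _ (by simpa using hlen)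

theorem pyCeilSqrt_pos {n : Nat} (h : 0 < n) : 0 < pyCeilSqrt n := by
  unfold pyCeilSqrt
  split
  · next heq =>
    rcases Nat.eq_zero_or_pos (Nat.sqrt n) with h0 | h0
    · rw [h0] at heq; simp at heq; omega
    · exact h0
  · omega

theorem le_sq_pyCeilSqrt (n : Nat) : n ≤ pyCeilSqrt n * pyCeilSqrt n := by
  unfold pyCeilSqrt
  split
  · next heq => omega
  · have := Nat.lt_succ_sqrt n
    simp only [Nat.succ_eq_add_one] at this
    omega

-- ===== VERDICT (by name: the statement is the Claim_ definition above) =====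
theorem convert_string_to_matrix_spec : Claim_equal_convert_string_to_matrix := by
  intro text _ hpre
  unfold Spec_convert_string_to_matrix
  unfold convert_string_to_matrix convert_string_to_matrix_alt
  simp only [PySem.Str.len_eq, Int.toNat_natCast, PySem.Str.toList_upper]
  have htl : text.toList ≠ [] := by
    intro h
    exact hpre (String.toList_eq_nil_iff.mp h)
  have hn : 0 < text.toList.length := List.length_pos_iff.mpr htl
  set cs := PySem.Chars.upper text.toList with hcs
  have hcslen : cs.length = text.toList.length := by
    simp [hcs, PySem.Chars.upper]
  set size := pyCeilSqrt text.toList.length with hsz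
  have hsize : 0 < size := pyCeilSqrt_pos hn
  have hfits : cs.length ≤ size * size := by
    rw [hcslen]; exact le_sq_pyCeilSqrt _
  rw [matrixA_eq cs size, matrixB_eq cs size hsize hfits]
  set M := rowsSpec size size (cs.map (fun c => ((c.toNat : Int) - 65))) with hM
  cases hlast : M.getLast? with
  | none => rfl
  | some last =>
    have hmem : last ∈ M := List.mem_of_getLast? hlast
    have hle : last.length ≤ size := rowsSpec_row_len hmem
    dsimp only
    rw [padA_eq size last hle, padB_eq size last]
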